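-- pv_equiv track=rewrite | github.com/raethira/LeetCode-practice | CrashCourse/Greedy/HowManyApplesCanYouPutIntoTheBasket/code.py | maxNumberOfApples
-- ===== SOURCE A (Python) =====
-- from typing import List
--
-- def maxNumberOfApples(weight: List[int]) -> int:
--
--     weight.sort()
--     max_weight = 5000
--     count = 0
--
--     for apple in weight:
--         if max_weight - apple >= 0:
--             max_weight -= apple
--             count += 1
--
--     return count
-- ===== SOURCE B (Python) =====
-- from typing import List
--
-- def maxNumberOfApples(weight: List[int]) -> int:
--     weight.sort()
--     # Binary search the answer: the feasible counts k (sum of the k smallest <= 5000)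
--     # form a downward-closed set, so find the largest feasible k by bisection.
--     lo, hi = 0, len(weight)
--     while lo < hi:
--         mid = (lo + hi + 1) // 2
--         if sum(weight[:mid]) <= 5000:
--             lo = mid
--         else:
--             hi = mid - 1
--     return lo
-- ===== Notes on version B (the rewrite author's own statement) =====
-- stated objective: alternative
-- what changed: Replaces the single greedy accumulation pass with a binary search on the answer: since the set of feasible counts k (sum of the k smallest weights <= 5000) is downward closed after sorting, B bisects over k, re-summing the slice weight[:mid] at each probe, instead of walking the list with a running capacity.
import Mathlib
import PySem

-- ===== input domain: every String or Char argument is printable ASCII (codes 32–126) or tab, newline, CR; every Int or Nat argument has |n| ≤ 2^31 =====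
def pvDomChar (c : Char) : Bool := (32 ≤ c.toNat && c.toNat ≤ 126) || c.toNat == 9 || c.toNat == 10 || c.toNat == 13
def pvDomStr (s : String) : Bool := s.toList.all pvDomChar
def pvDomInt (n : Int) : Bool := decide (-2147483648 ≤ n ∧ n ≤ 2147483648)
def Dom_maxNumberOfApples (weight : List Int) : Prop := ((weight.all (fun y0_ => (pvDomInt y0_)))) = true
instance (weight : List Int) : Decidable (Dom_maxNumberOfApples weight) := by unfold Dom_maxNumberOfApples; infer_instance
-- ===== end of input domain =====

-- B replaces A's running-capacity greedy pass with a binary search on the answer (largest k with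
-- sum of the k smallest weights ≤ 5000), re-summing the slice at each probe; same in-place
-- weight.sort() side effect in Python, the equivalence proved is about the return value.


-- ===== PORT A =====
-- weight.sort(); then the greedy loop over a (max_weight, count) state.
def maxNumberOfApples (weight : List Int) : Int :=
  let sw := PySem.List.sorted weight (fun x => x) false
  (sw.foldl (fun (st : Int × Int) apple =>
      if st.1 - apple ≥ 0 then (st.1 - apple, st.2 + 1) else st) (5000, 0)).2

-- ===== PORT B =====
-- mid = (lo + hi + 1) // 2
def pvMid (lo hi : Int) : Int := PySem.Int.floordiv (lo + hi + 1) 2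

-- midpoint bracketing; cited by pvBsLoop's decreasing_by
lemma pvMid_bounds {lo hi : Int} (h : lo < hi) :
    lo + 1 ≤ pvMid lo hi ∧ pvMid lo hi ≤ hi := by
  unfold pvMid
  have e : lo + hi + 1 = (lo + 1) + hi := by ring
  rw [e]
  exact PySem.Int.floordiv_two_mid_bounds (by omega)

-- the while-loop: binary search for the largest k with sum(weight[:k]) <= 5000
def pvBsLoop (sw : List Int) (lo hi : Int) : Int :=
  if h : lo < hi then
    if (PySem.List.slice sw none (some (pvMid lo hi))).sum ≤ 5000 then
      pvBsLoop sw (pvMid lo hi) hi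
    else
      pvBsLoop sw lo (pvMid lo hi - 1)
  else lo
termination_by (hi - lo).toNat
decreasing_by
  · have := pvMid_bounds h; omega
  · have := pvMid_bounds h; omega

-- weight.sort(); lo, hi = 0, len(weight); then the while loop; return lo
def maxNumberOfApples_alt (weight : List Int) : Int :=
  let sw := PySem.List.sorted weight (fun x => x) false
  pvBsLoop sw 0 (PySem.List.len sw)

-- ===== PRECONDITION & SPEC =====
def Spec_maxNumberOfApples (weight : List Int) (out : Int) : Prop := out = maxNumberOfApples_alt weight
instance (weight : List Int) (out : Int) : Decidable (Spec_maxNumberOfApples weight out) := by unfold Spec_maxNumberOfApples; infer_instance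

-- ===== CLAIM (what is proved, stated in full; the proofs are below) =====
def Claim_equal_maxNumberOfApples : Prop := ∀ (weight : List Int), Dom_maxNumberOfApples weight → Spec_maxNumberOfApples weight (maxNumberOfApples weight)

-- ===== LEMMAS AND PROOFS =====

lemma pvSumNonpos (l : List Int) (h : ∀ x ∈ l, x ≤ 0) : l.sum ≤ 0 := by
  induction l with
  | nil => simp
  | cons x l ih =>
    simp only [List.sum_cons]
    have hx := h x (by simp)
    have := ih (fun y hy => h y (by simp [hy]))
    omega

lemma pvSliceTake (xs : List Int) (b : Int) (hb : 0 ≤ b) :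
    PySem.List.slice xs none (some b) = xs.take b.toNat := by
  rw [show b = ((b.toNat : Nat) : Int) from (Int.toNat_of_nonneg hb).symm,
    PySem.List.slice_to_natCast, Int.toNat_natCast]

-- once the remaining capacity is below every element, the greedy fold is the identity
lemma pvSkip (l : List Int) : ∀ (r c : Int), (∀ x ∈ l, r < x) →
    l.foldl (fun (st : Int × Int) apple =>
      if st.1 - apple ≥ 0 then (st.1 - apple, st.2 + 1) else st) (r, c) = (r, c) := by
  induction l with
  | nil => intro r c _; rfl
  | cons w l ih =>
      intro r c h
      have hw : r < w := h w (by simp)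
      have : ¬ (r - w ≥ 0) := by omega
      simp only [List.foldl_cons, if_neg this]
      exact ih r c (fun x hx => h x (by simp [hx]))

-- characterization of A's greedy fold on a sorted list: it returns c + m where m is the
-- largest prefix length whose sum fits in r, and every longer prefix overshoots
lemma pvGreedy (l : List Int) : ∀ (r c : Int), 0 ≤ r → l.Pairwise (· ≤ ·) →
    ∃ m : Nat, m ≤ l.length ∧
      (l.foldl (fun (st : Int × Int) apple =>
        if st.1 - apple ≥ 0 then (st.1 - apple, st.2 + 1) else st) (r, c)).2 = c + m ∧
      (l.take m).sum ≤ r ∧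
      ∀ k : Nat, m < k → k ≤ l.length → r < (l.take k).sum := by
  induction l with
  | nil =>
    intro r c hr _
    exact ⟨0, by simp, by simp, by simpa using hr, by intro k hk1 hk2; simp at hk2; omega⟩
  | cons w l ih =>
    intro r c hr hp
    have hle : ∀ x ∈ l, w ≤ x := (List.pairwise_cons.mp hp).1
    have hp' := (List.pairwise_cons.mp hp).2
    by_cases h : r - w ≥ 0
    · obtain ⟨m', hm'len, hres, hfeas, hfail⟩ := ih (r - w) (c + 1) (by omega) hp'
      refine ⟨m' + 1, by simp; omega, ?_, ?_, ?_⟩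
      · simp only [List.foldl_cons, if_pos h]
        rw [hres]; push_cast; ring
      · simp only [List.take_succ_cons, List.sum_cons]
        omega
      · intro k hk1 hk2
        obtain ⟨k', rfl⟩ : ∃ k', k = k' + 1 := ⟨k - 1, by omega⟩
        simp only [List.take_succ_cons, List.sum_cons]
        have := hfail k' (by omega) (by simp at hk2; omega)
        omega
    · have hskip := pvSkip l r c (fun x hx => by have := hle x hx; omega)
      refine ⟨0, by simp, ?_, by simpa using hr, ?_⟩
      · simp only [List.foldl_cons, if_neg h]
        rw [hskip]; simp
      · intro k hk1 hk2
        obtain ⟨k', rfl⟩ : ∃ k', k = k' + 1 := ⟨k - 1, by omega⟩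
        simp only [List.take_succ_cons, List.sum_cons]
        have hnn : 0 ≤ (l.take k').sum := List.sum_nonneg (fun x hx => by
          have := hle x (List.mem_of_mem_take hx); omega)
        omega

-- on a sorted list the feasible prefix lengths are downward closed (one step)
lemma pvTakeStep (l : List Int) (hp : l.Pairwise (· ≤ ·)) (j : Nat)
    (h : (l.take (j + 1)).sum ≤ 5000) : (l.take j).sum ≤ 5000 := by
  by_cases hj : j < l.length
  · rw [List.take_add_one, List.getElem?_eq_getElem hj] at h
    simp only [Option.toList_some, List.sum_append, List.sum_cons, List.sum_nil] at h
    by_cases hw : 0 ≤ l[j]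
    · omega
    · have hall : ∀ x ∈ l.take j, x ≤ 0 := by
        intro x hx
        rw [List.mem_take_iff_getElem] at hx
        obtain ⟨i, hi, rfl⟩ := hx
        have := (List.pairwise_iff_getElem.mp hp) i j (by omega) hj (by omega)
        omega
      have := pvSumNonpos _ hall
      omega
  · have h1 : l.take (j + 1) = l := List.take_of_length_le (by omega)
    have h2 : l.take j = l := List.take_of_length_le (by omega)
    rw [h2]; rw [h1] at h; exact h

lemma pvClosure (l : List Int) (hp : l.Pairwise (· ≤ ·)) :
    ∀ (k j : Nat), j ≤ k → (l.take k).sum ≤ 5000 → (l.take j).sum ≤ 5000 := by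
  intro k
  induction k with
  | zero => intro j hj h; rw [Nat.le_zero.mp hj]; exact h
  | succ k ih =>
    intro j hj h
    rcases Nat.lt_or_ge j (k + 1) with hl | hg
    · exact ih j (by omega) (pvTakeStep l hp k h)
    · have : j = k + 1 := by omega
      subst this; exact h

-- the binary search converges to m whenever lo ≤ m ≤ hi and feasibility is 'k ≤ m'
lemma pvLoopEq (sw : List Int) (m : Nat)
    (hF : ∀ k : Nat, k ≤ sw.length → ((sw.take k).sum ≤ 5000 ↔ k ≤ m)) :
    ∀ (f : Nat) (lo hi : Int), (hi - lo).toNat ≤ f → 0 ≤ lo → lo ≤ (m : Int) →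
      (m : Int) ≤ hi → hi ≤ (sw.length : Int) → pvBsLoop sw lo hi = (m : Int) := by
  intro f
  induction f with
  | zero =>
    intro lo hi hf h0 h1 h2 h3
    rw [pvBsLoop, dif_neg (by omega)]
    omega
  | succ f ih =>
    intro lo hi hf h0 h1 h2 h3
    rw [pvBsLoop]
    by_cases hlt : lo < hi
    · rw [dif_pos hlt]
      have hm := pvMid_bounds hlt
      have hmid0 : 0 ≤ pvMid lo hi := by omega
      rw [pvSliceTake sw _ hmid0]
      have hiff := hF (pvMid lo hi).toNat (by omega)
      by_cases hc : (sw.take (pvMid lo hi).toNat).sum ≤ 5000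
      · rw [if_pos hc]
        have hmm : pvMid lo hi ≤ (m : Int) := by
          have := hiff.mp hc; omega
        exact ih (pvMid lo hi) hi (by omega) (by omega) hmm h2 h3
      · rw [if_neg hc]
        have hmm : (m : Int) ≤ pvMid lo hi - 1 := by
          by_contra hcon
          exact hc (hiff.mpr (by omega))
        exact ih lo (pvMid lo hi - 1) (by omega) h0 h1 hmm (by omega)
    · rw [dif_neg hlt]; omega

-- ===== VERDICT (by name: the statement is the Claim_ definition above) =====
theorem maxNumberOfApples_spec : Claim_equal_maxNumberOfApples := by
  intro weight _
  simp only [Spec_maxNumberOfApples, maxNumberOfApples, maxNumberOfApples_alt]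
  have hp : (PySem.List.sorted weight (fun x => x) false).Pairwise (· ≤ ·) := by
    simpa using PySem.List.sorted_pairwise weight (fun x => x)
  obtain ⟨m, hmlen, hres, hfeas, hfail⟩ :=
    pvGreedy (PySem.List.sorted weight (fun x => x) false) 5000 0 (by norm_num) hp
  have hF : ∀ k : Nat, k ≤ (PySem.List.sorted weight (fun x => x) false).length →
      (((PySem.List.sorted weight (fun x => x) false).take k).sum ≤ 5000 ↔ k ≤ m) := by
    intro k hk
    constructor
    · intro hs
      by_contra hcon
      have := hfail k (by omega) hk
      omega
    · intro hk2
      exact pvClosure _ hp m k hk2 hfeas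
  rw [hres, PySem.List.len_eq,
    pvLoopEq _ m hF (PySem.List.sorted weight (fun x => x) false).length 0 _
      (by omega) (by omega) (by omega) (by exact_mod_cast hmlen) (by omega)]
  simp
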